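-- pv_equiv track=rewrite | github.com/lenhan1803044/CTDL | python_ctdl/buoi4/5_15.py | solve
-- ===== SOURCE A (Python) =====
-- def solve(n, A):
--     # Kết quả là mảng hai chiều để chứa next greater và next smaller
--     next_greater = [-1] * n
--     next_smaller = [-1] * n
--     stack_greater = []
--
--     # Bước 1: Tìm next greater cho mỗi phần tử
--     for i in range(n - 1, -1, -1):
--         while stack_greater and A[stack_greater[-1]] <= A[i]:
--             stack_greater.pop()
--         if stack_greater:
--             next_greater[i] = A[stack_greater[-1]]
--         stack_greater.append(i)
--
--     # Bước 2: Tìm next smaller cho mỗi phần tử lớn hơn tiếp theo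
--     for i in range(n):
--         if next_greater[i] == -1:
--             continue
--         stack_smaller = []
--         for j in range(i + 1, n):
--             if A[j] < next_greater[i]:
--                 stack_smaller.append(A[j])
--
--         if stack_smaller:
--             next_smaller[i] = stack_smaller[0]
--
--     return next_smaller
-- ===== SOURCE B (Python) =====
-- def solve(n, A):
--     # Per-index direct scans instead of a backward monotonic stack plus a
--     # collect-all inner list: nearest greater value, then first value below it.
--     def nearest_greater(i):
--         return next((A[j] for j in range(i + 1, n) if A[j] > A[i]), -1)
--
--     def first_below(i, limit):
--         return next((A[j] for j in range(i + 1, n) if A[j] < limit), -1)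
--
--     out = []
--     for i in range(n):
--         g = nearest_greater(i)
--         out.append(-1 if g == -1 else first_below(i, g))
--     return out
-- ===== Notes on version B (the rewrite author's own statement) =====
-- stated objective: simpler
-- what changed: B drops A's backward monotonic-stack pass and its collect-all-then-take-first inner list: for each index it does two direct first-match scans (nearest greater value, then first value below it), with no stacks and no in-place array mutation.
-- outside the precondition, e.g. on solve(3, [1]): A raises IndexError, B raises IndexError
import Mathlib
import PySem

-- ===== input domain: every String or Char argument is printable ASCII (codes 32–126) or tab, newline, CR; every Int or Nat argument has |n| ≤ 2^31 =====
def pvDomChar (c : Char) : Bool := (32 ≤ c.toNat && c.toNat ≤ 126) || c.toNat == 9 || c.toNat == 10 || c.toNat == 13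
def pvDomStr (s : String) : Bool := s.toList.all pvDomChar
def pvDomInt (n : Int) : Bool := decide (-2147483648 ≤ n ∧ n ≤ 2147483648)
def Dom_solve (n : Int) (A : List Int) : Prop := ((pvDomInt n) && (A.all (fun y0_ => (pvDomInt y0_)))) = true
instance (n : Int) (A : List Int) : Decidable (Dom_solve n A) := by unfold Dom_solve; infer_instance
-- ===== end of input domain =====

-- B replaces A's backward monotonic-stack pass and its quadratic collect-all inner loop
-- by two direct first-match scans per index (simpler, no stacks, no list mutation).

-- A[k] (both ports index only in range under Pre_; default never read there)
def av (A : List Int) (k : Nat) : Int := A.getD k 0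

-- ===== PORT A =====
-- the `while stack_greater and A[stack_greater[-1]] <= A[i]: stack_greater.pop()` loop
-- (stack kept head-as-top)
def popWhile (A : List Int) (ai : Int) : List Nat → List Nat
  | [] => []
  | t :: rest => if av A t ≤ ai then popWhile A ai rest else t :: rest

-- one iteration of A's first (backward) loop; state = (next_greater, stack_greater)
def step1 (A : List Int) (st : List Int × List Nat) (i : Nat) : List Int × List Nat :=
  let s := popWhile A (av A i) st.2
  let ng := match s with
            | [] => st.1
            | t :: _ => st.1.set i (av A t)
  (ng, i :: s)

-- one iteration of A's second loop; builds stack_smaller and takes its first element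
def step2 (A : List Int) (N : Nat) (ng : List Int) (ns : List Int) (i : Nat) : List Int :=
  if ng.getD i 0 = -1 then ns
  else
    let ngv := ng.getD i 0
    let sm := ((List.range' (i+1) (N - (i+1))).filter (fun j => av A j < ngv)).map
                (fun j => av A j)
    match sm with
    | [] => ns
    | x :: _ => ns.set i x

def solve (n : Int) (A : List Int) : List Int :=
  let N := n.toNat
  let p1 := ((List.range N).reverse).foldl (step1 A) (List.replicate N (-1), [])
  (List.range N).foldl (step2 A N p1.1) (List.replicate N (-1))

-- ===== PORT B =====
-- next((A[j] for j in range(i+1, n) if A[j] > A[i]), -1)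
def nearestGreater (A : List Int) (N : Nat) (i : Nat) : Int :=
  match (List.range' (i+1) (N - (i+1))).find? (fun j => av A i < av A j) with
  | some j => av A j
  | none => -1

-- next((A[j] for j in range(i+1, n) if A[j] < limit), -1)
def firstBelow (A : List Int) (N : Nat) (i : Nat) (limit : Int) : Int :=
  match (List.range' (i+1) (N - (i+1))).find? (fun j => av A j < limit) with
  | some j => av A j
  | none => -1

def solve_alt (n : Int) (A : List Int) : List Int :=
  let N := n.toNat
  (List.range N).map (fun i =>
    let g := nearestGreater A N i
    if g = -1 then -1 else firstBelow A N i g)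

-- ===== PRECONDITION & SPEC =====
-- Pre_ excludes exactly the inputs where Python A raises IndexError (n exceeds len(A)).
def Pre_solve (n : Int) (A : List Int) : Prop := n ≤ (A.length : Int)
instance (n : Int) (A : List Int) : Decidable (Pre_solve n A) := by unfold Pre_solve; infer_instance
def pvWitness_solve : Int × List Int := (4, [2, 5, 1, 3])

def Spec_solve (n : Int) (A : List Int) (out : List Int) : Prop := out = solve_alt n A
instance (n : Int) (A : List Int) (out : List Int) : Decidable (Spec_solve n A out) := by unfold Spec_solve; infer_instance

-- ===== CLAIM (what is proved, stated in full; the proofs are below) =====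
def Claim_equal_solve : Prop := ∀ (n : Int) (A : List Int), Dom_solve n A → Pre_solve n A → Spec_solve n A (solve n A)

-- ===== LEMMAS AND PROOFS =====

-- "j is a strict prefix-maximum seen from m": A[k] < A[j] for all k ∈ [m, j)
def goodB (A : List Int) (m j : Nat) : Bool :=
  (List.range' m (j - m)).all (fun k => decide (av A k < av A j))

-- characterisation of the stack after processing indices [m, N)
def stk (A : List Int) (N m : Nat) : List Nat :=
  (List.range' m (N - m)).filter (goodB A m)

-- characterisation of next_greater after processing indices [m, N)
def ngl (A : List Int) (N m : Nat) : List Int :=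
  (List.range N).map (fun j => if m ≤ j then nearestGreater A N j else -1)

theorem head?_filter_eq_find? {α : Type} (p : α → Bool) (l : List α) :
    (l.filter p).head? = l.find? p := by
  induction l with
  | nil => rfl
  | cons x xs ih => by_cases h : p x <;> simp [List.filter_cons, List.find?_cons, h, ih]

theorem popWhile_eq_dropWhile (A : List Int) (ai : Int) (l : List Nat) :
    popWhile A ai l = l.dropWhile (fun t => av A t ≤ ai) := by
  induction l with
  | nil => rfl
  | cons t rest ih => by_cases h : av A t ≤ ai <;> simp [popWhile, List.dropWhile_cons, h, ih]

theorem dropWhile_eq_filter_of_pairwise {α : Type} (f : α → Int) (c : Int) (l : List α)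
    (hp : l.Pairwise (fun j j' => f j < f j')) :
    l.dropWhile (fun t => f t ≤ c) = l.filter (fun t => c < f t) := by
  induction l with
  | nil => rfl
  | cons t rest ih =>
    rcases List.pairwise_cons.mp hp with ⟨hhead, htail⟩
    rw [List.dropWhile_cons, List.filter_cons]
    by_cases h : f t ≤ c
    · rw [if_pos (by simpa using h), if_neg (by simpa using not_lt.mpr h), ih htail]
    · have h' : c < f t := not_le.mp h
      rw [if_neg (by simpa using h), if_pos (by simpa using h')]
      congr 1
      symm
      refine List.filter_eq_self.mpr ?_
      intro x hx
      simpa using lt_trans h' (hhead x hx)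

theorem pairwise_stk (A : List Int) (N m : Nat) :
    (stk A N m).Pairwise (fun j j' => av A j < av A j') := by
  have hlt : (stk A N m).Pairwise (· < ·) := by
    unfold stk
    exact List.Pairwise.sublist List.filter_sublist (List.pairwise_lt_range' 1 Nat.one_pos)
  refine List.pairwise_iff_forall_sublist.mpr ?_
  intro j j' hsub
  have hjj' : j < j' := List.pairwise_iff_forall_sublist.mp hlt hsub
  have hj' : j' ∈ stk A N m := hsub.subset (by simp)
  have hj : j ∈ stk A N m := hsub.subset (by simp)
  have hgood : goodB A m j' = true := (List.mem_filter.mp hj').2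
  have hjmem : j ∈ List.range' m (N - m) := (List.mem_filter.mp hj).1
  have hjm : m ≤ j := (List.mem_range'_1.mp hjmem).1
  have : j ∈ List.range' m (j' - m) := List.mem_range'_1.mpr ⟨hjm, by omega⟩
  have := (List.all_eq_true.mp hgood) j this
  simpa using this

-- goodB from m is goodB from m+1 plus the comparison with A[m]
theorem goodB_succ (A : List Int) (m j : Nat) (hj : m + 1 ≤ j) :
    goodB A m j = (decide (av A m < av A j) && goodB A (m+1) j) := by
  unfold goodB
  have h1 : j - m = (j - (m+1)) + 1 := by omega
  rw [h1, List.range'_succ, List.all_cons]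

-- first element of the prefix-maxima ≥ a is the first element greater than A[m],
-- provided everything in [m+1, a) is ≤ A[m]
theorem head_good_eq_find (A : List Int) (m : Nat) :
    ∀ (len a : Nat), m + 1 ≤ a →
    (∀ k, m + 1 ≤ k → k < a → av A k ≤ av A m) →
    ((List.range' a len).filter (goodB A m)).head? =
      (List.range' a len).find? (fun j => av A m < av A j) := by
  intro len
  induction len with
  | zero => intro a _ _; rfl
  | succ s ih =>
    intro a ha hacc
    rw [List.range'_succ]
    by_cases h : av A m < av A a
    · have hg : goodB A m a = true := by
        unfold goodB
        refine List.all_eq_true.mpr ?_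
        intro k hk
        rcases List.mem_range'_1.mp hk with ⟨h1, h2⟩
        simp only [decide_eq_true_eq]
        rcases Nat.eq_or_lt_of_le h1 with rfl | hlt
        · exact h
        · exact lt_of_le_of_lt (hacc k hlt (by omega)) h
      rw [List.filter_cons, List.find?_cons]
      rw [if_pos (by simpa using hg), decide_eq_true h]
      rfl
    · have hg : goodB A m a = false := by
        cases hgb : goodB A m a with
        | false => rfl
        | true =>
          exfalso
          have hm : m ∈ List.range' m (a - m) := List.mem_range'_1.mpr ⟨le_refl m, by omega⟩
          have := (List.all_eq_true.mp (by unfold goodB at hgb; exact hgb)) m hm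
          simp only [decide_eq_true_eq] at this
          exact h this
      rw [List.filter_cons, List.find?_cons]
      rw [if_neg (by simp [hg]), decide_eq_false h]
      exact ih (a+1) (by omega) (by
        intro k h1 h2
        rcases Nat.eq_or_lt_of_le (Nat.lt_succ_iff.mp h2) with rfl | hlt
        · exact not_lt.mp h
        · exact hacc k h1 hlt)

-- setting index m of a mapped range
theorem set_map_range {f : Nat → Int} (N m : Nat) (x : Int) (hm : m < N) :
    ((List.range N).map f).set m x =
      (List.range N).map (fun j => if j = m then x else f j) := by
  apply List.ext_getElem
  · simp
  · intro i h1 h2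
    simp only [List.length_map, List.length_range] at h1
    rw [List.getElem_set]
    simp only [List.getElem_map, List.getElem_range]
    by_cases h : m = i
    · simp [h]
    · rw [if_neg h, if_neg (fun hh => h hh.symm)]

theorem ngl_top (A : List Int) (N : Nat) : ngl A N N = List.replicate N (-1) := by
  unfold ngl
  apply List.ext_getElem
  · simp
  · intro i h1 h2
    simp only [List.length_map, List.length_range] at h1
    simp [List.getElem_range, Nat.not_le.mpr h1]

-- the phase-1 invariant: folding over [m, N) in reverse from the initial state
theorem phase1_inv (A : List Int) (N : Nat) :
    ∀ (m : Nat), m ≤ N →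
    ((List.range' m (N - m)).reverse).foldl (step1 A) (List.replicate N (-1), []) =
      (ngl A N m, stk A N m) := by
  intro m hm
  induction hN : N - m generalizing m with
  | zero =>
    have : m = N := by omega
    subst this
    simp [stk, ngl_top, hN]
  | succ s ih =>
    have hmN : m < N := by omega
    have hs : N - (m+1) = s := by omega
    rw [List.range'_succ]
    simp only [List.reverse_cons, List.foldl_append, List.foldl_cons, List.foldl_nil]
    rw [ih (m+1) (by omega) hs]
    -- now compute step1 at m from the invariant state
    have hpair : (stk A N (m+1)).Pairwise (fun j j' => av A j < av A j') :=
      pairwise_stk A N (m+1)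
    have hpop : popWhile A (av A m) (stk A N (m+1)) =
        (stk A N (m+1)).filter (fun t => av A m < av A t) := by
      rw [popWhile_eq_dropWhile, dropWhile_eq_filter_of_pairwise (av A) _ _ hpair]
    have hff : (stk A N (m+1)).filter (fun t => av A m < av A t) =
        (List.range' (m+1) (N - (m+1))).filter (goodB A m) := by
      unfold stk
      rw [List.filter_filter]
      apply List.filter_congr
      intro j hj
      have hj1 : m + 1 ≤ j := (List.mem_range'_1.mp hj).1
      rw [goodB_succ A m j hj1, Bool.and_comm]
    have hhead : ((List.range' (m+1) (N - (m+1))).filter (goodB A m)).head? =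
        (List.range' (m+1) (N - (m+1))).find? (fun j => av A m < av A j) := by
      exact head_good_eq_find A m (N - (m+1)) (m+1) (le_refl _) (by intro k h1 h2; omega)
    have hstk : stk A N m = m :: (List.range' (m+1) (N - (m+1))).filter (goodB A m) := by
      unfold stk
      rw [hN, List.range'_succ, List.filter_cons]
      have : goodB A m m = true := by unfold goodB; simp
      rw [hs] at *
      simp [this]
    unfold step1
    simp only [hpop, hff]
    rw [hstk]
    congr 1
    -- next_greater component
    rcases hcase : ((List.range' (m+1) (N - (m+1))).filter (goodB A m)) with _ | ⟨t, rest⟩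
    · -- stack empty after pop: find? must be none, nearestGreater m = -1
      have hfind : (List.range' (m+1) (N - (m+1))).find?
          (fun j => av A m < av A j) = none := by
        rw [← hhead, hcase]; rfl
      have hng : nearestGreater A N m = -1 := by
        unfold nearestGreater; rw [hfind]
      unfold ngl
      apply List.ext_getElem
      · simp
      · intro i h1 h2
        simp only [List.length_map, List.length_range] at h1
        simp only [List.getElem_map, List.getElem_range]
        by_cases hi : m = i
        · subst hi; simp [hng]
        · by_cases hle : m + 1 ≤ i
          · simp [hle, le_of_lt (by omega : m < i)]
          · have : ¬ m ≤ i := by omega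
            simp [hle, this]
    · -- stack nonempty: head t is the nearest-greater index of m
      have hfind : (List.range' (m+1) (N - (m+1))).find?
          (fun j => av A m < av A j) = some t := by
        rw [← hhead, hcase]; rfl
      have hng : nearestGreater A N m = av A t := by
        unfold nearestGreater; rw [hfind]
      show ((List.range N).map (fun j => if m + 1 ≤ j then nearestGreater A N j else -1)).set m (av A t)
          = ngl A N m
      unfold ngl
      rw [set_map_range N m _ hmN]
      apply List.map_congr_left
      intro j hj
      have hjN : j < N := List.mem_range.mp hj
      by_cases hjm : j = m
      · subst hjm; simp [hng]
      · by_cases hle : m + 1 ≤ j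
        · simp [hjm, hle, le_of_lt (by omega : m < j)]
        · have : ¬ m ≤ j := by omega
          simp [hjm, hle, this]

-- B's per-index value
def bval (A : List Int) (N i : Nat) : Int :=
  let g := nearestGreater A N i
  if g = -1 then -1 else firstBelow A N i g

-- the value A's phase 2 writes at index i equals bval
theorem step2_writes_bval (A : List Int) (N : Nat) (i : Nat) (hi : i < N) (ns : List Int)
    (hns : ns = (List.range N).map (fun j => if j < i then bval A N j else -1)) :
    step2 A N (ngl A N 0) ns i =
      (List.range N).map (fun j => if j < i + 1 then bval A N j else -1) := by
  have hget : (ngl A N 0).getD i 0 = nearestGreater A N i := by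
    unfold ngl
    rw [List.getD_eq_getElem?_getD]
    simp [List.getElem?_map, List.getElem?_range, hi]
  unfold step2
  rw [hget]
  by_cases hng : nearestGreater A N i = -1
  · -- skipped: entry stays -1 which equals bval i
    have hb : bval A N i = -1 := by unfold bval; simp [hng]
    simp only [hng, if_pos rfl]
    rw [hns]
    apply List.map_congr_left
    intro j hj
    by_cases h : j < i
    · simp [h, (by omega : j < i + 1)]
    · by_cases h2 : j < i + 1
      · have : j = i := by omega
        subst this
        simp [h, h2, hb]
      · simp [h, h2]
  · simp only [hng, if_neg hng]
    have hmapfilter :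
        (((List.range' (i+1) (N - (i+1))).filter (fun j => av A j < nearestGreater A N i)).map
          (fun j => av A j)).head? =
        ((List.range' (i+1) (N - (i+1))).find? (fun j => av A j < nearestGreater A N i)).map
          (fun j => av A j) := by
      rw [List.head?_map, head?_filter_eq_find?]
    rcases hcase : ((List.range' (i+1) (N - (i+1))).filter
        (fun j => av A j < nearestGreater A N i)).map (fun j => av A j) with _ | ⟨x, rest⟩
    · -- no smaller element found: firstBelow = -1 = entry left alone
      have hfind : (List.range' (i+1) (N - (i+1))).find?
          (fun j => av A j < nearestGreater A N i) = none := by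
        have := hmapfilter
        rw [hcase] at this
        cases h : (List.range' (i+1) (N - (i+1))).find?
            (fun j => av A j < nearestGreater A N i) with
        | none => rfl
        | some j => rw [h] at this; simp at this
      have hb : bval A N i = -1 := by
        unfold bval firstBelow
        simp [hng, hfind]
      rw [hns]
      apply List.map_congr_left
      intro j hj
      by_cases h : j < i
      · simp [h, (by omega : j < i + 1)]
      · by_cases h2 : j < i + 1
        · have : j = i := by omega
          subst this
          simp [h, h2, hb]
        · simp [h, h2]
    · -- found: entry becomes the first collected value = firstBelow
      have hx : some x = ((List.range' (i+1) (N - (i+1))).find?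
          (fun j => av A j < nearestGreater A N i)).map (fun j => av A j) := by
        rw [← hmapfilter, hcase]; rfl
      have hb : bval A N i = x := by
        unfold bval firstBelow
        rw [if_neg hng]
        cases h : (List.range' (i+1) (N - (i+1))).find?
            (fun j => av A j < nearestGreater A N i) with
        | none => rw [h] at hx; simp at hx
        | some j => rw [h] at hx; simp at hx; exact hx.symm
      rw [hns]
      show ((List.range N).map (fun j => if j < i then bval A N j else -1)).set i x =
        (List.range N).map (fun j => if j < i + 1 then bval A N j else -1)
      rw [set_map_range N i x hi]
      apply List.map_congr_left
      intro j hj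
      have hjN : j < N := List.mem_range.mp hj
      by_cases hji : j = i
      · subst hji; simp [hb]
      · by_cases h : j < i
        · simp [hji, h, (by omega : j < i + 1)]
        · have h2 : ¬ j < i + 1 := by omega
          simp [hji, h, h2]

theorem phase2_inv (A : List Int) (N : Nat) :
    ∀ (m : Nat), m ≤ N →
    (List.range m).foldl (step2 A N (ngl A N 0)) (List.replicate N (-1)) =
      (List.range N).map (fun j => if j < m then bval A N j else -1) := by
  intro m hm
  induction m with
  | zero =>
    apply List.ext_getElem
    · simp
    · intro i h1 h2
      simp only [List.length_replicate] at h1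
      simp
  | succ s ih =>
    rw [List.range_succ, List.foldl_append, List.foldl_cons, List.foldl_nil]
    rw [ih (by omega)]
    exact step2_writes_bval A N s (by omega) _ rfl

-- ===== VERDICT (by name: the statement is the Claim_ definition above) =====
theorem solve_spec : Claim_equal_solve := by
  intro n A _ _
  unfold Spec_solve solve solve_alt
  simp only []
  have h1 : ((List.range n.toNat).reverse).foldl (step1 A) (List.replicate n.toNat (-1), []) =
      (ngl A n.toNat 0, stk A n.toNat 0) := by
    have := phase1_inv A n.toNat 0 (Nat.zero_le _)
    simpa [List.range_eq_range'] using this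
  rw [h1]
  have h2 := phase2_inv A n.toNat n.toNat (le_refl _)
  rw [h2]
  apply List.map_congr_left
  intro j hj
  have : j < n.toNat := List.mem_range.mp hj
  simp [this, bval]
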